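-- pv_equiv track=rewrite | github.com/yjh4124/algorithm_yjh | 백준/Silver/16564. 히오스 프로게이머/히오스 프로게이머.py | getMinimumTeamLevel
-- ===== SOURCE A (Python) =====
-- def getMinimumTeamLevel(x_levels, k_level):
--     sorted_levels = sorted(x_levels)
--     minLevel = min(sorted_levels)
--     maxLevel = max(sorted_levels) + k_level
--     mid = (minLevel + maxLevel) // 2
--
--     while minLevel <= maxLevel:
--         sum = 0
--         for level in x_levels:
--             if mid > level:
--                 sum += mid - level
--                 if sum > k_level:
--                     break
--
--         if sum > k_level:
--             maxLevel = mid - 1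
--         elif sum < k_level:
--             minLevel = mid + 1
--         elif sum == k_level:
--             break
--
--         mid = (minLevel + maxLevel) // 2
--
--     tLevel = mid
--
--     return tLevel
-- ===== SOURCE B (Python) =====
-- def getMinimumTeamLevel(x_levels, k_level):
--     # sort once; prefix sums + bisection make each binary-search step O(log n)
--     s = sorted(x_levels)
--     n = len(s)
--     prefix = [0]
--     total = 0
--     for v in s:
--         total += v
--         prefix.append(total)
--     lo, hi = s[0] - 1, s[n - 1] + k_level
--     while lo < hi:
--         mid = (lo + hi + 1) // 2
--         # count of players strictly below mid (hand-rolled bisect_left on the sorted list)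
--         a, b = 0, n
--         while a < b:
--             m = (a + b) // 2
--             if s[m] < mid:
--                 a = m + 1
--             else:
--                 b = m
--         if a * mid - prefix[a] <= k_level:
--             lo = mid
--         else:
--             hi = mid - 1
--     return lo
-- ===== Notes on version B (the rewrite author's own statement) =====
-- stated objective: alternative
-- what changed: Replaces A's O(n) inner scan per binary-search step by prefix sums computed once after sorting plus a hand-rolled bisect count, so each step of the binary search on the answer does O(log n) work; intended as faster but measured only ~1.2x (A's early break keeps its scan short), so no speed is claimed.
-- outside the precondition, e.g. on getMinimumTeamLevel([4, -1], -14): A returns -6, B returns -2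
import Mathlib
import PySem

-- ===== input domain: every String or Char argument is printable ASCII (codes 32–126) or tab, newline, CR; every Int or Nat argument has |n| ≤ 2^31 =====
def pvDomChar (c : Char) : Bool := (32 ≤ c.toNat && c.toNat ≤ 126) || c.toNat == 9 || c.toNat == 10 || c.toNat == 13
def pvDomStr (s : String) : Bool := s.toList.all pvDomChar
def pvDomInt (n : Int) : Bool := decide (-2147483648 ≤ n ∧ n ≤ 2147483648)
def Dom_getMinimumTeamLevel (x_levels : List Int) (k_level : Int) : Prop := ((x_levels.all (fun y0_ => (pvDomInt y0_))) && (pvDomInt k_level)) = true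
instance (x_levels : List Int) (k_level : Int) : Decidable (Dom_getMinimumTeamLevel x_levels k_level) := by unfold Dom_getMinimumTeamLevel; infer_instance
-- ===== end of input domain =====

-- B replaces A's per-step linear scan by a once-computed prefix-sum table plus a
-- bisection count inside the binary search on the answer (objective: alternative;
-- measured only ~1.2x on random inputs, A's early break keeps it competitive).

-- ===== PORT A =====

-- inner 'for level in x_levels' loop with its early break once sum > k_level
def pvInnerA (k mid : Int) : List Int → Int → Int
  | [], s => s
  | l :: t, s =>
    if mid > l then
      let s' := s + (mid - l)
      if s' > k then s' else pvInnerA k mid t s'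
    else pvInnerA k mid t s

-- A's while loop; A computes mid from the current (minLevel, maxLevel) once before the
-- loop and again at the end of every iteration — exactly the value computed here at entry.
def pvLoopA (xs : List Int) (k lo hi : Int) : Int :=
  if h : lo ≤ hi then
    let mid := PySem.Int.floordiv (lo + hi) 2
    let s := pvInnerA k mid xs 0
    if s > k then pvLoopA xs k lo (mid - 1)
    else if s < k then pvLoopA xs k (mid + 1) hi
    else mid
  else PySem.Int.floordiv (lo + hi) 2
termination_by (hi + 1 - lo).toNat
decreasing_by
  · have hb := PySem.Int.floordiv_two_mid_bounds (lo := lo) (hi := hi) h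
    omega
  · have hb := PySem.Int.floordiv_two_mid_bounds (lo := lo) (hi := hi) h
    omega

def getMinimumTeamLevel (x_levels : List Int) (k_level : Int) : Int :=
  let sorted_levels := PySem.List.sorted x_levels (fun v => v) false
  match PySem.List.min? sorted_levels (fun v => v), PySem.List.max? sorted_levels (fun v => v) with
  | some minLevel, some mx => pvLoopA x_levels k_level minLevel (mx + k_level)
  | _, _ => 0  -- dead code: min()/max() raise on the empty list, which Pre_ excludes

-- ===== PORT B =====

-- Source B's hand-rolled bisect_left: first index a with not (s[a] < mid)
def pvBisect (s : List Int) (mid : Int) (a b : Nat) : Nat :=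
  if h : a < b then
    let m := (a + b) / 2
    if s.getD m 0 < mid then pvBisect s mid (m + 1) b else pvBisect s mid a m
  else a
termination_by b - a
decreasing_by all_goals omega

-- the 'for v in s: total += v; prefix.append(total)' loop of Source B
def pvPrefix (s : List Int) : List Int :=
  (s.foldl (fun acc v => (acc.1 ++ [acc.2 + v], acc.2 + v)) ([0], 0)).1

-- Source B's 'while lo < hi' binary search on the answer
def pvLoopB (s pfx : List Int) (k lo hi : Int) : Int :=
  if h : lo < hi then
    let mid := PySem.Int.floordiv (lo + hi + 1) 2
    let a := pvBisect s mid 0 s.length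
    if (a : Int) * mid - pfx.getD a 0 ≤ k then pvLoopB s pfx k mid hi
    else pvLoopB s pfx k lo (mid - 1)
  else lo
termination_by (hi - lo).toNat
decreasing_by
  · have e : lo + hi + 1 = (lo + 1) + hi := by ring
    rw [e]
    have hb := PySem.Int.floordiv_two_mid_bounds (lo := lo + 1) (hi := hi) (by omega)
    omega
  · have e : lo + hi + 1 = (lo + 1) + hi := by ring
    rw [e]
    have hb := PySem.Int.floordiv_two_mid_bounds (lo := lo + 1) (hi := hi) (by omega)
    omega

def getMinimumTeamLevel_alt (x_levels : List Int) (k_level : Int) : Int :=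
  let s := PySem.List.sorted x_levels (fun v => v) false
  let n := s.length
  let pfx := pvPrefix s
  pvLoopB s pfx k_level (s.getD 0 0 - 1) (s.getD (n - 1) 0 + k_level)

-- ===== PRECONDITION & SPEC =====
-- Pre_ excludes the empty list (A's min() raises ValueError) and inputs where k is so
-- negative that A's search interval [min, max+k] is empty (k + 1 < min - max), where A
-- skips the loop and returns the accidental pre-loop midpoint (min+max+k)//2.
def Pre_getMinimumTeamLevel (x_levels : List Int) (k_level : Int) : Prop :=
  x_levels ≠ [] ∧ ∃ a ∈ x_levels, ∃ b ∈ x_levels, a - b ≤ k_level + 1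
instance (x_levels : List Int) (k_level : Int) : Decidable (Pre_getMinimumTeamLevel x_levels k_level) := by
  unfold Pre_getMinimumTeamLevel; infer_instance

def pvWitness_getMinimumTeamLevel : List Int × Int := ([1, 2, 3], 4)

def Spec_getMinimumTeamLevel (x_levels : List Int) (k_level : Int) (out : Int) : Prop := out = getMinimumTeamLevel_alt x_levels k_level
instance (x_levels : List Int) (k_level : Int) (out : Int) : Decidable (Spec_getMinimumTeamLevel x_levels k_level out) := by unfold Spec_getMinimumTeamLevel; infer_instance

-- ===== CLAIM (what is proved, stated in full; the proofs are below) =====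
def Claim_equal_getMinimumTeamLevel : Prop := ∀ (x_levels : List Int) (k_level : Int), Dom_getMinimumTeamLevel x_levels k_level → Pre_getMinimumTeamLevel x_levels k_level → Spec_getMinimumTeamLevel x_levels k_level (getMinimumTeamLevel x_levels k_level)

-- ===== LEMMAS AND PROOFS =====

-- the total boost needed to raise every player below m up to m
def pvCost (xs : List Int) (m : Int) : Int := (xs.map (fun l => if m > l then m - l else 0)).sum

-- the value both loops compute: the greatest r in [mn-1, mx+k] that is mn-1 or affordable
def pvOut (xs : List Int) (k mn mx r : Int) : Prop :=
  (r = mn - 1 ∨ pvCost xs r ≤ k) ∧ (∀ m, r < m → m ≤ mx + k → ¬ pvCost xs m ≤ k) ∧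
  mn - 1 ≤ r ∧ r ≤ mx + k

theorem pvCost_nonneg (xs : List Int) (m : Int) : 0 ≤ pvCost xs m := by
  apply List.sum_nonneg
  intro x hx
  obtain ⟨l, _, rfl⟩ := List.mem_map.mp hx
  split <;> omega

theorem pvCost_mono (xs : List Int) {m m' : Int} (h : m ≤ m') : pvCost xs m ≤ pvCost xs m' := by
  apply List.sum_le_sum
  intro l _
  dsimp only
  split <;> split <;> omega

theorem pvCost_succ (xs : List Int) {l0 m : Int} (hmem : l0 ∈ xs) (hle : l0 ≤ m) :
    pvCost xs m + 1 ≤ pvCost xs (m + 1) := by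
  obtain ⟨u, v, rfl⟩ := List.mem_iff_append.mp hmem
  unfold pvCost
  simp only [List.map_append, List.sum_append, List.map_cons, List.sum_cons]
  have h1 : (u.map (fun l => if m > l then m - l else 0)).sum ≤ (u.map (fun l => if m + 1 > l then m + 1 - l else 0)).sum := by
    apply List.sum_le_sum; intro l _; dsimp only; split <;> split <;> omega
  have h2 : (v.map (fun l => if m > l then m - l else 0)).sum ≤ (v.map (fun l => if m + 1 > l then m + 1 - l else 0)).sum := by
    apply List.sum_le_sum; intro l _; dsimp only; split <;> split <;> omega
  have h3 : (if m > l0 then m - l0 else 0) + 1 ≤ (if m + 1 > l0 then m + 1 - l0 else 0) := by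
    split <;> split <;> omega
  omega

theorem pvInnerA_spec (k mid : Int) (xs : List Int) (s : Int) :
    (s + pvCost xs mid ≤ k → pvInnerA k mid xs s = s + pvCost xs mid) ∧
    (k < s + pvCost xs mid → k < pvInnerA k mid xs s) := by
  induction xs generalizing s with
  | nil => simp [pvInnerA, pvCost]
  | cons l t ih =>
    have hc : pvCost (l :: t) mid = (if mid > l then mid - l else 0) + pvCost t mid := by
      simp [pvCost]
    have hn := pvCost_nonneg t mid
    rw [hc]
    by_cases hl : mid > l
    · rw [if_pos hl]
      simp only [pvInnerA, if_pos hl]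
      by_cases hk : s + (mid - l) > k
      · simp only [if_pos hk]
        constructor
        · intro h; omega
        · intro _; omega
      · simp only [if_neg hk]
        have := ih (s + (mid - l))
        constructor
        · intro h; rw [this.1 (by omega)]; ring
        · intro h; exact this.2 (by omega)
    · rw [if_neg hl]
      simp only [pvInnerA, if_neg hl]
      have := ih s
      constructor
      · intro h; rw [this.1 (by omega)]; omega
      · intro h; exact this.2 (by omega)

theorem pvOut_unique {xs : List Int} {k mn mx r1 r2 : Int}
    (h1 : pvOut xs k mn mx r1) (h2 : pvOut xs k mn mx r2) : r1 = r2 := by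
  obtain ⟨g1, u1, lb1, ub1⟩ := h1
  obtain ⟨g2, u2, lb2, ub2⟩ := h2
  by_contra hne
  rcases lt_or_gt_of_ne hne with h | h
  · have := u1 r2 h ub2
    rcases g2 with e | e
    · omega
    · exact this e
  · have := u2 r1 h ub1
    rcases g1 with e | e
    · omega
    · exact this e

theorem pvPrefix_fold (s : List Int) (pr : List Int) (tot : Int) :
    s.foldl (fun acc v => (acc.1 ++ [acc.2 + v], acc.2 + v)) (pr, tot) =
      (pr ++ (List.range s.length).map (fun i => tot + (s.take (i + 1)).sum), tot + s.sum) := by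
  induction s generalizing pr tot with
  | nil => simp
  | cons v t ih =>
    simp only [List.foldl_cons, ih]
    refine Prod.ext ?_ (by simp [List.sum_cons]; ring)
    simp only [List.length_cons, List.range_succ_eq_map, List.map_cons, List.map_map,
      List.take_succ_cons, List.sum_cons, List.take_zero, List.sum_nil, List.append_assoc]
    congr 1
    · simp
      intro a _
      ring

theorem pvPrefix_getD (s : List Int) (a : Nat) (ha : a ≤ s.length) :
    (pvPrefix s).getD a 0 = (s.take a).sum := by
  have h := pvPrefix_fold s [0] 0
  unfold pvPrefix
  rw [h]
  cases a with
  | zero => simp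
  | succ j =>
    have hj : j < s.length := by omega
    simp only [List.getD, List.cons_append, List.nil_append]
    rw [List.getElem?_cons_succ]
    rw [List.getElem?_map]
    rw [List.getElem?_eq_getElem (by simpa using hj)]
    simp

theorem pvSumConstSub (mid : Int) (t : List Int) :
    (t.map (fun l => mid - l)).sum = (t.length : Int) * mid - t.sum := by
  induction t with
  | nil => simp
  | cons v u ih => simp [ih]; ring

theorem pvCost_of_split {s : List Int} (mid : Int) {r : Nat} (hr : r ≤ s.length)
    (hlow : ∀ i, i < r → s.getD i 0 < mid)
    (hhigh : ∀ i, r ≤ i → i < s.length → ¬ s.getD i 0 < mid) :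
    pvCost s mid = (r : Int) * mid - (s.take r).sum := by
  have hlow' : ∀ l ∈ s.take r, l < mid := by
    intro l hl
    obtain ⟨i, hi, rfl⟩ := List.mem_iff_getElem.mp hl
    have hi' : i < r := by simp at hi; omega
    have := hlow i hi'
    rw [List.getD_eq_getElem s 0 (by omega)] at this
    simpa [List.getElem_take] using this
  have hhigh' : ∀ l ∈ s.drop r, ¬ l < mid := by
    intro l hl
    obtain ⟨i, hi, rfl⟩ := List.mem_iff_getElem.mp hl
    have hlen : i < s.length - r := by simpa using hi
    have := hhigh (r + i) (by omega) (by omega)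
    rw [List.getD_eq_getElem s 0 (by omega)] at this
    simpa [List.getElem_drop] using this
  have hsplit : pvCost s mid = pvCost (s.take r) mid + pvCost (s.drop r) mid := by
    unfold pvCost
    rw [← List.sum_append, ← List.map_append, List.take_append_drop]
  rw [hsplit]
  have h1 : pvCost (s.take r) mid = (r : Int) * mid - (s.take r).sum := by
    unfold pvCost
    rw [List.map_congr_left (fun l hl => (by simp [hlow' l hl] : (if mid > l then mid - l else 0) = mid - l))]
    rw [pvSumConstSub]
    congr 2
    simp [List.length_take]
    omega
  have h2 : pvCost (s.drop r) mid = 0 := by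
    unfold pvCost
    rw [List.map_congr_left (fun l hl => by simp [hhigh' l hl] : ∀ l ∈ s.drop r, (if mid > l then mid - l else 0) = (fun _ => (0:Int)) l)]
    simp
  rw [h1, h2]
  ring

theorem pvSorted_getD_mono {s : List Int} (hs : s.Pairwise (· ≤ ·)) {i j : Nat}
    (hij : i ≤ j) (hj : j < s.length) : s.getD i 0 ≤ s.getD j 0 := by
  rw [List.getD_eq_getElem s 0 (by omega), List.getD_eq_getElem s 0 hj]
  rcases Nat.eq_or_lt_of_le hij with rfl | hlt
  · rfl
  · exact (List.pairwise_iff_getElem.mp hs) i j (by omega) hj hlt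

theorem pvBisect_spec {s : List Int} (hs : s.Pairwise (· ≤ ·)) (mid : Int) {a b : Nat}
    (hab : a ≤ b) (hb : b ≤ s.length)
    (hlow : ∀ i, i < a → s.getD i 0 < mid)
    (hhigh : ∀ i, b ≤ i → i < s.length → ¬ s.getD i 0 < mid) :
    pvBisect s mid a b ≤ s.length ∧
    (∀ i, i < pvBisect s mid a b → s.getD i 0 < mid) ∧
    (∀ i, pvBisect s mid a b ≤ i → i < s.length → ¬ s.getD i 0 < mid) := by
  induction hn : b - a using Nat.strong_induction_on generalizing a b with
  | _ n ih =>
  rw [pvBisect]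
  by_cases h : a < b
  · rw [dif_pos h]
    set m := (a + b) / 2 with hm
    have hm1 : a ≤ m := by omega
    have hm2 : m < b := by omega
    by_cases hsm : s.getD m 0 < mid
    · rw [if_pos hsm]
      exact ih (b - (m + 1)) (by omega) (by omega) hb
        (fun i hi => lt_of_le_of_lt (pvSorted_getD_mono hs (by omega) (by omega)) hsm)
        hhigh rfl
    · rw [if_neg hsm]
      exact ih (m - a) (by omega) hm1 (by omega) hlow
        (fun i hi hilen => fun hc => hsm (lt_of_le_of_lt (pvSorted_getD_mono hs hi hilen) hc))
        rfl
  · rw [dif_neg h]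
    have : a = b := by omega
    subst this
    exact ⟨hb, hlow, hhigh⟩

theorem pvLoopA_out {xs : List Int} {k mn mx : Int} (hmem : mn ∈ xs) : ∀ {lo hi : Int},
    mn ≤ lo → lo ≤ hi + 1 → hi ≤ mx + k →
    (lo - 1 = mn - 1 ∨ pvCost xs (lo - 1) ≤ k) →
    (∀ m, hi < m → m ≤ mx + k → ¬ pvCost xs m ≤ k) →
    pvOut xs k mn mx (pvLoopA xs k lo hi) := by
  intro lo hi
  induction hn : (hi + 1 - lo).toNat using Nat.strong_induction_on generalizing lo hi with
  | _ n ih =>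
  intro h1 h2 h3 h4 h5
  rw [pvLoopA]
  by_cases h : lo ≤ hi
  · rw [dif_pos h]
    have hb := PySem.Int.floordiv_two_mid_bounds (lo := lo) (hi := hi) h
    set mid := PySem.Int.floordiv (lo + hi) 2 with hmid
    have hspec := pvInnerA_spec k mid xs 0
    by_cases hc : pvCost xs mid ≤ k
    · have hs : pvInnerA k mid xs 0 = pvCost xs mid := by
        have := hspec.1 (by omega); omega
      rw [if_neg (by omega)]
      by_cases hlt : pvCost xs mid < k
      · rw [if_pos (by omega)]
        exact ih (hi + 1 - (mid + 1)).toNat (by omega) rfl (by omega) (by omega) h3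
          (Or.inr (by simpa using hc)) h5
      · rw [if_neg (by omega)]
        have hck : pvCost xs mid = k := by omega
        refine ⟨Or.inr (by omega), ?_, by omega, by omega⟩
        intro m hm hmx
        have hstep := pvCost_succ xs hmem (by omega : mn ≤ mid)
        have hmono := pvCost_mono xs (by omega : mid + 1 ≤ m)
        omega
    · have hs : k < pvInnerA k mid xs 0 := hspec.2 (by omega)
      rw [if_pos (by omega)]
      refine ih (mid - 1 + 1 - lo).toNat (by omega) rfl (by omega) (by omega) (by omega) h4 ?_
      intro m hm hmx
      by_cases hmh : m ≤ hi
      · have := pvCost_mono xs (by omega : mid ≤ m)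
        omega
      · exact h5 m (by omega) hmx
  · rw [dif_neg h]
    have hlo : lo = hi + 1 := by omega
    have hfd : PySem.Int.floordiv (lo + hi) 2 = hi := by
      rw [PySem.Int.floordiv_eq_iff_of_pos (by omega)]
      omega
    rw [hfd]
    have h4' : hi = mn - 1 ∨ pvCost xs hi ≤ k := by
      rcases h4 with e | e
      · left; omega
      · right; have : lo - 1 = hi := by omega
        rwa [this] at e
    exact ⟨h4', h5, by omega, by omega⟩

theorem pvCostS_eq {xs s : List Int} (hperm : s.Perm xs) (hs : s.Pairwise (· ≤ ·)) (mid : Int) :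
    (pvBisect s mid 0 s.length : Int) * mid - (pvPrefix s).getD (pvBisect s mid 0 s.length) 0 =
      pvCost xs mid := by
  obtain ⟨hlen, hlow, hhigh⟩ := pvBisect_spec hs mid (Nat.zero_le _) le_rfl
    (fun i hi => absurd hi (Nat.not_lt_zero i)) (fun i hi hilen => absurd hilen (by omega))
  rw [pvPrefix_getD s _ hlen]
  rw [← pvCost_of_split mid hlen hlow hhigh]
  unfold pvCost
  exact List.Perm.sum_eq (List.Perm.map _ hperm)

theorem pvLoopB_out {xs s : List Int} {k mn mx : Int}
    (hperm : s.Perm xs) (hs : s.Pairwise (· ≤ ·)) : ∀ {lo hi : Int},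
    mn - 1 ≤ lo → lo ≤ hi → hi ≤ mx + k →
    (lo = mn - 1 ∨ pvCost xs lo ≤ k) →
    (∀ m, hi < m → m ≤ mx + k → ¬ pvCost xs m ≤ k) →
    pvOut xs k mn mx (pvLoopB s (pvPrefix s) k lo hi) := by
  intro lo hi
  induction hn : (hi - lo).toNat using Nat.strong_induction_on generalizing lo hi with
  | _ n ih =>
  intro h1 h2 h3 h4 h5
  rw [pvLoopB]
  by_cases h : lo < hi
  · rw [dif_pos h]
    have e : lo + hi + 1 = (lo + 1) + hi := by ring
    have hb := PySem.Int.floordiv_two_mid_bounds (lo := lo + 1) (hi := hi) (by omega)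
    rw [← e] at hb
    set mid := PySem.Int.floordiv (lo + hi + 1) 2 with hmid
    simp only [pvCostS_eq hperm hs]
    by_cases hc : pvCost xs mid ≤ k
    · rw [if_pos hc]
      exact ih (hi - mid).toNat (by omega) rfl (by omega) (by omega) h3 (Or.inr hc) h5
    · rw [if_neg hc]
      refine ih (mid - 1 - lo).toNat (by omega) rfl h1 (by omega) (by omega) h4 ?_
      intro m hm hmx
      by_cases hmh : m ≤ hi
      · have := pvCost_mono xs (by omega : mid ≤ m)
        omega
      · exact h5 m (by omega) hmx
  · rw [dif_neg h]
    have : lo = hi := by omega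
    subst this
    exact ⟨h4, h5, h1, by omega⟩

-- ===== VERDICT (by name: the statement is the Claim_ definition above) =====
theorem getMinimumTeamLevel_spec : Claim_equal_getMinimumTeamLevel := by
  intro xs k _hdom hpre
  obtain ⟨hne, a, ha, b, hb, hk⟩ := hpre
  unfold Spec_getMinimumTeamLevel
  set s := PySem.List.sorted xs (fun v => v) false with hsdef
  have hperm : s.Perm xs := PySem.List.sorted_perm xs (fun v => v) false
  have hs : s.Pairwise (· ≤ ·) := PySem.List.sorted_pairwise xs (fun v => v)
  have hslen : s ≠ [] := by
    intro h0
    apply hne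
    have hl := hperm.length_eq
    rw [h0] at hl
    exact List.eq_nil_of_length_eq_zero hl.symm
  have hlen : 0 < s.length := List.length_pos_iff.mpr hslen
  set mn := s.getD 0 0 with hmn
  set mx := s.getD (s.length - 1) 0 with hmx
  have hmn_mem_s : mn ∈ s := by
    rw [hmn, List.getD_eq_getElem s 0 hlen]
    exact List.getElem_mem hlen
  have hmx_mem_s : mx ∈ s := by
    rw [hmx, List.getD_eq_getElem s 0 (by omega)]
    exact List.getElem_mem (by omega)
  have hmn_mem : mn ∈ xs := hperm.mem_iff.mp hmn_mem_s
  have hmn_le : ∀ y ∈ s, mn ≤ y := by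
    intro y hy
    obtain ⟨i, hi, rfl⟩ := List.mem_iff_getElem.mp hy
    rw [hmn, ← List.getD_eq_getElem s 0 hi]
    exact pvSorted_getD_mono hs (Nat.zero_le i) hi
  have hle_mx : ∀ y ∈ s, y ≤ mx := by
    intro y hy
    obtain ⟨i, hi, rfl⟩ := List.mem_iff_getElem.mp hy
    rw [hmx, ← List.getD_eq_getElem s 0 hi]
    exact pvSorted_getD_mono hs (by omega) (by omega)
  have hmin : PySem.List.min? s (fun v => v) = some mn := by
    cases hmq : PySem.List.min? s (fun v => v) with
    | none => exact absurd ((PySem.List.min?_eq_none_iff _ _).mp hmq) hslen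
    | some m =>
      have h1 := PySem.List.min?_isMin hmq mn hmn_mem_s
      have h2 := hmn_le m (PySem.List.min?_mem hmq)
      simp only at h1 h2
      rw [le_antisymm h1 h2]
  have hmax : PySem.List.max? s (fun v => v) = some mx := by
    cases hmq : PySem.List.max? s (fun v => v) with
    | none => exact absurd ((PySem.List.max?_eq_none_iff _ _).mp hmq) hslen
    | some m =>
      have h1 := PySem.List.max?_isMax hmq mx hmx_mem_s
      have h2 := hle_mx m (PySem.List.max?_mem hmq)
      simp only at h1 h2
      rw [le_antisymm h2 h1]
  have hmnmx : mn ≤ mx := hle_mx mn hmn_mem_s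
  have hband : mn ≤ mx + k + 1 := by
    have h1 : mn ≤ a := hmn_le a (hperm.mem_iff.mpr ha)
    have h2 : b ≤ mx := hle_mx b (hperm.mem_iff.mpr hb)
    omega
  have hA : getMinimumTeamLevel xs k = pvLoopA xs k mn (mx + k) := by
    simp only [getMinimumTeamLevel, ← hsdef, hmin, hmax]
  have hB : getMinimumTeamLevel_alt xs k = pvLoopB s (pvPrefix s) k (mn - 1) (mx + k) := by
    unfold getMinimumTeamLevel_alt
    rw [← hsdef]
  rw [hA, hB]
  exact pvOut_unique
    (pvLoopA_out hmn_mem le_rfl (by omega) le_rfl (Or.inl rfl) (fun m h1 h2 => by omega))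
    (pvLoopB_out hperm hs le_rfl (by omega) le_rfl (Or.inl rfl) (fun m h1 h2 => by omega))
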